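-- pv_equiv track=rewrite | github.com/gahjelle/advent_of_code | python/2023/05_if_you_give_a_seed_a_fertilizer/aoc202305.py | grow_range
-- ===== SOURCE A (Python) =====
-- def grow_range(seed_start, seed_stop, transform):
--     """Grow a range of seeds one stage.
--
--     This may split the range into several ranges.
--
--     ## Examples:
--
--     >>> transform = [(70, 78, -50), (20, 25, 40), (44, 47, -4)]
--     >>> grow_range(22, 25, transform)
--     [(62, 65)]
--     >>> grow_range(10, 20, transform)
--     [(10, 20)]
--     >>> grow_range(11, 22, transform)
--     [(11, 20), (60, 62)]
--     >>> grow_range(77, 80, transform)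
--     [(27, 28), (78, 80)]
--     >>> grow_range(18, 29, transform)
--     [(18, 20), (60, 65), (25, 29)]
--     """
--     if seed_stop <= seed_start:
--         return []
--
--     for start, stop, offset in transform:
--         # Fully contained in the current interval
--         if start <= seed_start < stop and start < seed_stop <= stop:
--             return [(seed_start + offset, seed_stop + offset)]
--
--         # No overlap with current interval
--         if seed_stop <= start or seed_start >= stop:
--             continue
--
--         # The general case, a range needs to be split in three parts:
--         # - before and after the current interval is sent of to separate processing
--         # - the intersection with the current interval is handled
--         return (
--             grow_range(seed_start, start, transform)
--             + [(max(seed_start, start) + offset, min(seed_stop, stop) + offset)]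
--             + grow_range(stop, seed_stop, transform)
--         )
--
--     return [(seed_start, seed_stop)]
-- ===== SOURCE B (Python) =====
-- def grow_range(seed_start, seed_stop, transform):
--     """Grow a range of seeds one stage (iterative: explicit LIFO work stack)."""
--     out = []
--     stack = [(True, seed_start, seed_stop)]
--     while stack:
--         is_segment, lo, hi = stack.pop()
--         if not is_segment:
--             out.append((lo, hi))
--             continue
--         if hi <= lo:
--             continue
--         for start, stop, offset in transform:
--             if hi <= start or lo >= stop:
--                 continue
--             if start <= lo and hi <= stop:
--                 # fully contained: emit shifted range
--                 stack.append((False, lo + offset, hi + offset))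
--             else:
--                 # split: push after-part, intersection, before-part (pop order = left to right)
--                 stack.append((True, stop, hi))
--                 stack.append((False, max(lo, start) + offset, min(hi, stop) + offset))
--                 stack.append((True, lo, start))
--             break
--         else:
--             stack.append((False, lo, hi))
--     return out
-- ===== Notes on version B (the rewrite author's own statement) =====
-- stated objective: alternative
-- what changed: Replaced the recursion (before ++ [intersection] ++ after) with an iterative loop over an explicit LIFO work stack of segment/emit items, pushed in reverse so pops reproduce the in-order output.
import Mathlib
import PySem

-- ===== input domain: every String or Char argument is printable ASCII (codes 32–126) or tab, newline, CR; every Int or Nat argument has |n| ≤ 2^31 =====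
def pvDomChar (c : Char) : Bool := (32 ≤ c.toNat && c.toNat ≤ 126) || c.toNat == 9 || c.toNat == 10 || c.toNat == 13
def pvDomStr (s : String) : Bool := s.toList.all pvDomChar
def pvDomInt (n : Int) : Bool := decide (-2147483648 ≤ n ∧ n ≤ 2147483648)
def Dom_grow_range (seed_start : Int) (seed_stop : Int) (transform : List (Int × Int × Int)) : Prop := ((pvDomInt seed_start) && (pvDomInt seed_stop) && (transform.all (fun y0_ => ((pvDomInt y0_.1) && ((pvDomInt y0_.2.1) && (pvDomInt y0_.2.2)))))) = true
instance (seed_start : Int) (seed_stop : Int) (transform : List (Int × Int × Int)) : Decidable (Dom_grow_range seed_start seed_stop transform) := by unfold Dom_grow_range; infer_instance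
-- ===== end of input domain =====

-- B replaces A's recursion with an iterative loop over an explicit LIFO work stack
-- of segment/emit items (alternative decomposition, same cost); equal return values proved below.

-- ===== PORT A =====
-- Literal port of A's recursion.  The inner for-loop over `transform` becomes the
-- helper `growA_scan` over the remaining suffix `rem`; the proof argument `hab`
-- (range nonempty, known from the first guard) is carried only for termination.
mutual
def grow_range (seed_start : Int) (seed_stop : Int) (transform : List (Int × Int × Int)) : List (Int × Int) :=
  if h : seed_stop ≤ seed_start then []
  else growA_scan seed_start seed_stop (not_le.mp h) transform transform
termination_by ((seed_stop - seed_start).toNat, transform.length + 1)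

def growA_scan (a : Int) (b : Int) (hab : a < b) (tf : List (Int × Int × Int)) (rem : List (Int × Int × Int)) : List (Int × Int) :=
  match rem with
  | [] => [(a, b)]
  | (start, stop, offset) :: rest =>
    -- Fully contained in the current interval
    if hcont : start ≤ a ∧ a < stop ∧ start < b ∧ b ≤ stop then [(a + offset, b + offset)]
    -- No overlap with current interval
    else if hno : b ≤ start ∨ a ≥ stop then growA_scan a b hab tf rest
    -- The general case: split in three parts
    else grow_range a start tf ++ [(max a start + offset, min b stop + offset)] ++ grow_range stop b tf
termination_by ((b - a).toNat, rem.length)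
decreasing_by
  all_goals first
    | exact Prod.Lex.right _ (by simp)
    | exact Prod.Lex.left _ _ (by omega)
end

-- ===== PORT B =====
-- B's inner for-loop: scan `transform` for the first overlapping interval and return
-- the work items to push.  Python pushes them in reverse so they pop left-to-right;
-- here the stack is a list with its head as top, so the items appear in pop order.
def scanB (lo : Int) (hi : Int) (rem : List (Int × Int × Int)) : List (Bool × Int × Int) :=
  match rem with
  | [] => [(false, lo, hi)]                   -- for/else: nothing overlaps, emit unchanged
  | (start, stop, offset) :: rest =>
    if hi ≤ start ∨ lo ≥ stop then scanB lo hi rest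
    else if start ≤ lo ∧ hi ≤ stop then [(false, lo + offset, hi + offset)]
    else [(true, lo, start), (false, max lo start + offset, min hi stop + offset), (true, stop, hi)]

-- Termination measure for B's stack loop (not part of the computation).
def itemW : Bool × Int × Int → Nat
  | (true, lo, hi) => 4 ^ (hi - lo).toNat
  | (false, _, _) => 1

def stackW (st : List (Bool × Int × Int)) : Nat := (st.map itemW).sum

theorem stackW_append (xs ys : List (Bool × Int × Int)) : stackW (xs ++ ys) = stackW xs + stackW ys := by
  simp [stackW]

theorem scanB_weight (lo hi : Int) (h : lo < hi) (rem : List (Int × Int × Int)) :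
    stackW (scanB lo hi rem) < 4 ^ (hi - lo).toNat := by
  induction rem with
  | nil =>
    simp only [scanB, stackW, List.map, itemW, List.sum_cons, List.sum_nil]
    exact Nat.one_lt_pow (by omega) (by norm_num)
  | cons hd rest ih =>
    obtain ⟨s, t, o⟩ := hd
    simp only [scanB]
    split_ifs with h1 h2
    · exact ih
    · simp only [stackW, List.map, itemW, List.sum_cons, List.sum_nil]
      exact Nat.one_lt_pow (by omega) (by norm_num)
    · simp only [stackW, List.map, itemW, List.sum_cons, List.sum_nil]
      have hm : (hi - lo).toNat = ((hi - lo).toNat - 1) + 1 := by omega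
      have e1 : (4:ℕ) ^ (s - lo).toNat ≤ 4 ^ ((hi - lo).toNat - 1) :=
        Nat.pow_le_pow_right (by norm_num) (by omega)
      have e2 : (4:ℕ) ^ (hi - t).toNat ≤ 4 ^ ((hi - lo).toNat - 1) :=
        Nat.pow_le_pow_right (by norm_num) (by omega)
      have e3 : (4:ℕ) ^ (hi - lo).toNat = 4 ^ ((hi - lo).toNat - 1) * 4 := by
        conv_lhs => rw [hm]
        rw [pow_succ]
      have e4 : (1:ℕ) ≤ 4 ^ ((hi - lo).toNat - 1) := Nat.one_le_pow _ _ (by norm_num)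
      omega

-- B's while-loop over the LIFO stack; `acc` is the growing output list `out`.
def loopB (tf : List (Int × Int × Int)) (st : List (Bool × Int × Int)) (acc : List (Int × Int)) : List (Int × Int) :=
  match st with
  | [] => acc
  | (false, lo, hi) :: rest => loopB tf rest (acc ++ [(lo, hi)])
  | (true, lo, hi) :: rest =>
    if h : hi ≤ lo then loopB tf rest acc
    else loopB tf (scanB lo hi tf ++ rest) acc
termination_by stackW st
decreasing_by
  · simp [stackW, itemW]
  · have : 0 < 4 ^ (hi - lo).toNat := Nat.pow_pos (by norm_num)
    simp only [stackW, List.map, itemW, List.sum_cons]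
    omega
  · rw [stackW_append]
    have := scanB_weight lo hi (not_le.mp h) tf
    simp only [stackW, List.map, itemW, List.sum_cons] at *
    omega

def grow_range_alt (seed_start : Int) (seed_stop : Int) (transform : List (Int × Int × Int)) : List (Int × Int) :=
  loopB transform [(true, seed_start, seed_stop)] []

-- ===== PRECONDITION & SPEC =====
def Spec_grow_range (seed_start : Int) (seed_stop : Int) (transform : List (Int × Int × Int)) (out : List (Int × Int)) : Prop := out = grow_range_alt seed_start seed_stop transform
instance (seed_start : Int) (seed_stop : Int) (transform : List (Int × Int × Int)) (out : List (Int × Int)) : Decidable (Spec_grow_range seed_start seed_stop transform out) := by unfold Spec_grow_range; infer_instance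

-- ===== CLAIM (what is proved, stated in full; the proofs are below) =====
def Claim_equal_grow_range : Prop := ∀ (seed_start : Int) (seed_stop : Int) (transform : List (Int × Int × Int)), Dom_grow_range seed_start seed_stop transform → Spec_grow_range seed_start seed_stop transform (grow_range seed_start seed_stop transform)

-- ===== LEMMAS AND PROOFS =====

-- Denotation of a work item: what A computes for the corresponding sub-range.
def den (tf : List (Int × Int × Int)) (x : Bool × Int × Int) : List (Int × Int) :=
  if x.1 then grow_range x.2.1 x.2.2 tf else [(x.2.1, x.2.2)]

theorem grow_range_of_le {a b : Int} (tf : List (Int × Int × Int)) (h : b ≤ a) :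
    grow_range a b tf = [] := by
  rw [grow_range]; exact dif_pos h

theorem grow_range_of_lt {a b : Int} (tf : List (Int × Int × Int)) (hab : a < b) :
    grow_range a b tf = growA_scan a b hab tf tf := by
  rw [grow_range, dif_neg (not_le.mpr hab)]

theorem growA_scan_nil (a b : Int) (hab : a < b) (tf : List (Int × Int × Int)) :
    growA_scan a b hab tf [] = [(a, b)] := by
  rw [growA_scan]

theorem growA_scan_cons (a b : Int) (hab : a < b) (tf : List (Int × Int × Int))
    (s t o : Int) (rest : List (Int × Int × Int)) :
    growA_scan a b hab tf ((s, t, o) :: rest) =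
      if s ≤ a ∧ a < t ∧ s < b ∧ b ≤ t then [(a + o, b + o)]
      else if b ≤ s ∨ a ≥ t then growA_scan a b hab tf rest
      else grow_range a s tf ++ [(max a s + o, min b t + o)] ++ grow_range t b tf := by
  rw [growA_scan]
  split_ifs <;> rfl

-- The items B pushes denote exactly what A's inner loop returns.
theorem scan_den (tf : List (Int × Int × Int)) (a b : Int) (hab : a < b)
    (rem : List (Int × Int × Int)) :
    ((scanB a b rem).map (den tf)).flatten = growA_scan a b hab tf rem := by
  induction rem with
  | nil => simp [scanB, den, growA_scan_nil]
  | cons hd rest ih =>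
    obtain ⟨s, t, o⟩ := hd
    rw [growA_scan_cons]
    by_cases hov : b ≤ s ∨ a ≥ t
    · have hc : ¬(s ≤ a ∧ a < t ∧ s < b ∧ b ≤ t) := by omega
      rw [if_neg hc, if_pos hov]
      simp only [scanB, if_pos hov]
      exact ih
    · simp only [scanB, if_neg hov]
      by_cases hin : s ≤ a ∧ b ≤ t
      · have hc : s ≤ a ∧ a < t ∧ s < b ∧ b ≤ t := by omega
        rw [if_pos hc, if_pos hin]
        simp [den]
      · have hc : ¬(s ≤ a ∧ a < t ∧ s < b ∧ b ≤ t) := by omega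
        rw [if_neg hc, if_neg hin]
        simp [den]

-- Loop invariant: the loop appends, in order, the denotations of the stacked items.
theorem loopB_den (tf : List (Int × Int × Int)) (st : List (Bool × Int × Int))
    (acc : List (Int × Int)) :
    loopB tf st acc = acc ++ (st.map (den tf)).flatten := by
  fun_induction loopB tf st acc with
  | case1 => simp
  | case2 acc lo hi rest ih =>
    rw [ih]; simp [den]
  | case3 acc lo hi rest h ih =>
    rw [ih]
    simp [den, grow_range_of_le tf h]
  | case4 acc lo hi rest h ih =>
    rw [ih]
    simp only [List.map_append, List.flatten_append, List.map_cons, List.flatten_cons]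
    rw [scan_den tf lo hi (not_le.mp h) tf]
    simp [den, grow_range_of_lt tf (not_le.mp h)]

-- ===== VERDICT (by name: the statement is the Claim_ definition above) =====
theorem grow_range_spec : Claim_equal_grow_range := by
  intro a b tf _
  show grow_range a b tf = grow_range_alt a b tf
  rw [grow_range_alt, loopB_den]
  simp [den]
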